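-- pv_equiv track=rewrite | github.com/Harsh7637/test | backend/app/ml/resume_optimizer.py | prioritize_skills
-- ===== SOURCE A (Python) =====
-- from typing import List, Dict, Tuple
--
-- def prioritize_skills(
--
--     skills: List[str],
--     jd_keywords: List[str]
-- ) -> List[str]:
--     """
--     Prioritize skills based on job description relevance
--     """
--     jd_keywords_lower = [k.lower() for k in jd_keywords]
--
--     # Categorize skills
--     relevant = []  # Skills matching JD
--     technical = []  # Technical skills
--     soft = []      # Soft skills
--     other = []     # Other skills
--
--     soft_skill_indicators = ['communication', 'leadership', 'management', 'team', 'collaboration']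
--
--     for skill in skills:
--         skill_lower = skill.lower()
--
--         # Check if skill matches JD keywords
--         if any(keyword in skill_lower for keyword in jd_keywords_lower):
--             relevant.append(skill)
--         # Check if it's a soft skill
--         elif any(indicator in skill_lower for indicator in soft_skill_indicators):
--             soft.append(skill)
--         # Check if it's technical (has uppercase, numbers, or special chars)
--         elif any(c.isupper() for c in skill) or any(c.isdigit() for c in skill):
--             technical.append(skill)
--         else:
--             other.append(skill)
--
--     # Prioritize: Relevant > Technical > Other > Soft
--     prioritized = relevant + technical + other + soft
--
--     # Remove duplicates while preserving order
--     seen = set()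
--     final = []
--     for skill in prioritized:
--         if skill.lower() not in seen:
--             seen.add(skill.lower())
--             final.append(skill)
--
--     return final
-- ===== SOURCE B (Python) =====
-- def prioritize_skills(skills, jd_keywords):
--     """Prioritize skills by JD relevance via a key function and one stable sort."""
--     jd_keywords_lower = [k.lower() for k in jd_keywords]
--     soft_skill_indicators = ['communication', 'leadership', 'management', 'team', 'collaboration']
--
--     def priority(skill):
--         skill_lower = skill.lower()
--         if any(keyword in skill_lower for keyword in jd_keywords_lower):
--             return 0
--         if any(indicator in skill_lower for indicator in soft_skill_indicators):
--             return 3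
--         if any(c.isupper() or c.isdigit() for c in skill):
--             return 1
--         return 2
--
--     seen = set()
--     final = []
--     for skill in sorted(skills, key=priority):
--         low = skill.lower()
--         if low not in seen:
--             seen.add(low)
--             final.append(skill)
--     return final
-- ===== Notes on version B (the rewrite author's own statement) =====
-- stated objective: alternative
-- what changed: B replaces A's single pass that appends into four category lists and concatenates them with a priority-key function plus one stable sort (sorted(skills, key=priority)) followed by the same order-preserving lowercase dedup.
import Mathlib
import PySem

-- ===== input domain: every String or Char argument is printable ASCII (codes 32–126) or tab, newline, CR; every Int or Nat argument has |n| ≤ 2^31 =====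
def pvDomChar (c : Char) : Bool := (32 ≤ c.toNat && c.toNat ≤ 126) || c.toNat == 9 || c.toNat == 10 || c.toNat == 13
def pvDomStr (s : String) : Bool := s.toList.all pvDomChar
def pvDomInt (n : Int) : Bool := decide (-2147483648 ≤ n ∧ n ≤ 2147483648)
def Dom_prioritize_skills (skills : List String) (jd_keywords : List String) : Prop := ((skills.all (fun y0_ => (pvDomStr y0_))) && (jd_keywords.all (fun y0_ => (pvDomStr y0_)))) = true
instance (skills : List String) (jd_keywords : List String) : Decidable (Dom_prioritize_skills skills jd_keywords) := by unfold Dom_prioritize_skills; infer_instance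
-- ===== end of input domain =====

-- B replaces A's four-bucket build-and-concatenate with a priority key + one stable sort; same dedup; return values proved equal.

-- ===== PORT A =====
-- shared literal constant of both Pythons
def pvSoftIndicators : List String := ["communication", "leadership", "management", "team", "collaboration"]

-- the order-preserving dedup loop, textually identical in Source A and Source B ('seen' set of lowercased skills)
def pvDedupLoop (prioritized : List String) : List String :=
  (prioritized.foldl
    (fun (st : PySem.Set String × List String) skill =>
      if PySem.Set.contains st.1 (PySem.Str.lower skill) then st
      else (PySem.Set.add st.1 (PySem.Str.lower skill), st.2 ++ [skill]))
    (PySem.Set.empty, [])).2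

-- A: one pass appending each skill into one of four lists (relevant, soft, technical, other), then concatenate, then dedup
def prioritize_skills (skills : List String) (jd_keywords : List String) : List String :=
  let jd_keywords_lower := jd_keywords.map PySem.Str.lower
  let r := skills.foldl
    (fun (st : List String × List String × List String × List String) skill =>
      if jd_keywords_lower.any (fun keyword => PySem.Str.isIn keyword (PySem.Str.lower skill)) then
        (st.1 ++ [skill], st.2.1, st.2.2.1, st.2.2.2)
      else if pvSoftIndicators.any (fun indicator => PySem.Str.isIn indicator (PySem.Str.lower skill)) then
        (st.1, st.2.1 ++ [skill], st.2.2.1, st.2.2.2)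
      else if skill.toList.any PySem.Chars.isupper || skill.toList.any PySem.Chars.isdigit then
        (st.1, st.2.1, st.2.2.1 ++ [skill], st.2.2.2)
      else
        (st.1, st.2.1, st.2.2.1, st.2.2.2 ++ [skill]))
    ([], [], [], [])
  -- prioritized = relevant + technical + other + soft  (state is (relevant, soft, technical, other))
  pvDedupLoop (r.1 ++ r.2.2.1 ++ r.2.2.2 ++ r.2.1)

-- ===== PORT B =====
-- B's priority key: 0 = JD-relevant, 1 = technical, 2 = other, 3 = soft (elif precedence JD > soft > technical > other)
def pvPriority (jd_keywords_lower : List String) (skill : String) : Int :=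
  if jd_keywords_lower.any (fun keyword => PySem.Str.isIn keyword (PySem.Str.lower skill)) then 0
  else if pvSoftIndicators.any (fun indicator => PySem.Str.isIn indicator (PySem.Str.lower skill)) then 3
  else if skill.toList.any (fun c => PySem.Chars.isupper c || PySem.Chars.isdigit c) then 1
  else 2

-- B: one stable sort by the priority key, then the same dedup
def prioritize_skills_alt (skills : List String) (jd_keywords : List String) : List String :=
  let jd_keywords_lower := jd_keywords.map PySem.Str.lower
  pvDedupLoop (PySem.List.sorted skills (pvPriority jd_keywords_lower) false)

-- ===== PRECONDITION & SPEC =====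
def Spec_prioritize_skills (skills : List String) (jd_keywords : List String) (out : List String) : Prop := out = prioritize_skills_alt skills jd_keywords
instance (skills : List String) (jd_keywords : List String) (out : List String) : Decidable (Spec_prioritize_skills skills jd_keywords out) := by unfold Spec_prioritize_skills; infer_instance

-- ===== CLAIM (what is proved, stated in full; the proofs are below) =====
def Claim_equal_prioritize_skills : Prop := ∀ (skills : List String) (jd_keywords : List String), Dom_prioritize_skills skills jd_keywords → Spec_prioritize_skills skills jd_keywords (prioritize_skills skills jd_keywords)

-- ===== LEMMAS AND PROOFS =====

-- pvPriority takes only the values 0, 1, 2, 3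
theorem pvPriority_cases (jdl : List String) (x : String) :
    pvPriority jdl x = 0 ∨ pvPriority jdl x = 1 ∨ pvPriority jdl x = 2 ∨ pvPriority jdl x = 3 := by
  unfold pvPriority
  split_ifs <;> simp

-- insertBy puts x right between a prefix that does not trigger 'before' and a suffix that all does
theorem insertBy_middle {α : Type} (before : α → α → Bool) (x : α) (l1 l2 : List α)
    (h1 : ∀ y ∈ l1, before x y = false) (h2 : ∀ y ∈ l2, before x y = true) :
    PySem.List.insertBy before x (l1 ++ l2) = l1 ++ x :: l2 := by
  induction l1 with
  | nil =>
    cases l2 with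
    | nil => simp [PySem.List.insertBy]
    | cons y ys => simp [PySem.List.insertBy, h2 y (by simp)]
  | cons a t ih =>
    have ha : before x a = false := h1 a (by simp)
    simp only [List.cons_append, PySem.List.insertBy, ha]
    simp [ih (fun y hy => h1 y (by simp [hy]))]

-- a stable sort by a {0,1,2,3}-valued key is the concatenation of the four key-buckets in order
theorem sorted_key4 {α : Type} (key : α → Int)
    (hk : ∀ x, key x = 0 ∨ key x = 1 ∨ key x = 2 ∨ key x = 3) (xs : List α) :
    PySem.List.sorted xs key false =
      xs.filter (fun x => key x == 0) ++ xs.filter (fun x => key x == 1) ++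
      xs.filter (fun x => key x == 2) ++ xs.filter (fun x => key x == 3) := by
  induction xs using List.reverseRecOn with
  | nil => simp [PySem.List.sorted]
  | append_singleton ys x ih =>
    rw [PySem.List.sorted_eq_foldl_insertBy] at ih ⊢
    rw [List.foldl_append, List.foldl_cons, List.foldl_nil, ih]
    have hfm : ∀ (k : Int) (y : α), y ∈ ys.filter (fun z => key z == k) → key y = k := by
      intro k y hy
      have := (List.mem_filter.mp hy).2
      simpa using this
    rcases hk x with h | h | h | h
    · have := insertBy_middle (fun a b => decide (key a < key b)) x
        (ys.filter (fun z => key z == 0))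
        (ys.filter (fun z => key z == 1) ++ ys.filter (fun z => key z == 2) ++ ys.filter (fun z => key z == 3))
        (by intro y hy; have := hfm 0 y hy; simp [h, this])
        (by intro y hy
            simp only [List.mem_append] at hy
            rcases hy with (hy | hy) | hy
            · have := hfm 1 y hy; simp [h, this]
            · have := hfm 2 y hy; simp [h, this]
            · have := hfm 3 y hy; simp [h, this])
      simp only [List.append_assoc] at this ⊢
      rw [this]
      simp [List.filter_append, h]
    · have := insertBy_middle (fun a b => decide (key a < key b)) x
        (ys.filter (fun z => key z == 0) ++ ys.filter (fun z => key z == 1))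
        (ys.filter (fun z => key z == 2) ++ ys.filter (fun z => key z == 3))
        (by intro y hy
            simp only [List.mem_append] at hy
            rcases hy with hy | hy
            · have := hfm 0 y hy; simp [h, this]
            · have := hfm 1 y hy; simp [h, this])
        (by intro y hy
            simp only [List.mem_append] at hy
            rcases hy with hy | hy
            · have := hfm 2 y hy; simp [h, this]
            · have := hfm 3 y hy; simp [h, this])
      simp only [List.append_assoc] at this ⊢
      rw [this]
      simp [List.filter_append, h]
    · have := insertBy_middle (fun a b => decide (key a < key b)) x
        (ys.filter (fun z => key z == 0) ++ ys.filter (fun z => key z == 1) ++ ys.filter (fun z => key z == 2))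
        (ys.filter (fun z => key z == 3))
        (by intro y hy
            simp only [List.mem_append] at hy
            rcases hy with (hy | hy) | hy
            · have := hfm 0 y hy; simp [h, this]
            · have := hfm 1 y hy; simp [h, this]
            · have := hfm 2 y hy; simp [h, this])
        (by intro y hy; have := hfm 3 y hy; simp [h, this])
      simp only [List.append_assoc] at this ⊢
      rw [this]
      simp [List.filter_append, h]
    · have := insertBy_middle (fun a b => decide (key a < key b)) x
        (ys.filter (fun z => key z == 0) ++ ys.filter (fun z => key z == 1) ++
          ys.filter (fun z => key z == 2) ++ ys.filter (fun z => key z == 3)) []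
        (by intro y hy
            simp only [List.mem_append] at hy
            rcases hy with ((hy | hy) | hy) | hy
            · have := hfm 0 y hy; simp [h, this]
            · have := hfm 1 y hy; simp [h, this]
            · have := hfm 2 y hy; simp [h, this]
            · have := hfm 3 y hy; simp [h, this])
        (by intro y hy; simp at hy)
      simp only [List.append_nil, List.append_assoc] at this ⊢
      rw [this]
      simp [List.filter_append, h]

-- A's categorizing fold is four key-filters appended to the accumulators
theorem any_or_split {a : Type} (l : List a) (p q : a -> Bool) :
    (l.any fun c => p c || q c) = (l.any p || l.any q) := by
  induction l with
  | nil => rfl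
  | cons c t ih =>
    simp only [List.any_cons, ih]
    cases p c <;> cases q c <;> simp

theorem foldA_buckets (jdl : List String) (xs : List String)
    (rel so tech oth : List String) :
    xs.foldl
      (fun (st : List String × List String × List String × List String) skill =>
        if jdl.any (fun keyword => PySem.Str.isIn keyword (PySem.Str.lower skill)) then
          (st.1 ++ [skill], st.2.1, st.2.2.1, st.2.2.2)
        else if pvSoftIndicators.any (fun indicator => PySem.Str.isIn indicator (PySem.Str.lower skill)) then
          (st.1, st.2.1 ++ [skill], st.2.2.1, st.2.2.2)
        else if skill.toList.any PySem.Chars.isupper || skill.toList.any PySem.Chars.isdigit then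
          (st.1, st.2.1, st.2.2.1 ++ [skill], st.2.2.2)
        else
          (st.1, st.2.1, st.2.2.1, st.2.2.2 ++ [skill]))
      (rel, so, tech, oth) =
    (rel ++ xs.filter (fun x => pvPriority jdl x == 0),
     so ++ xs.filter (fun x => pvPriority jdl x == 3),
     tech ++ xs.filter (fun x => pvPriority jdl x == 1),
     oth ++ xs.filter (fun x => pvPriority jdl x == 2)) := by
  induction xs generalizing rel so tech oth with
  | nil => simp
  | cons x t ih =>
    simp only [List.foldl_cons]
    by_cases h0 : (jdl.any fun keyword => PySem.Str.isIn keyword (PySem.Str.lower x)) = true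
    · rw [if_pos h0]
      have hp : pvPriority jdl x = 0 := by unfold pvPriority; rw [if_pos h0]
      rw [ih]
      simp [hp]
    · rw [if_neg h0]
      by_cases h1 : (pvSoftIndicators.any fun indicator => PySem.Str.isIn indicator (PySem.Str.lower x)) = true
      · rw [if_pos h1]
        have hp : pvPriority jdl x = 3 := by
          unfold pvPriority; rw [if_neg h0, if_pos h1]
        rw [ih]
        simp [hp]
      · rw [if_neg h1]
        by_cases h2 : (x.toList.any PySem.Chars.isupper || x.toList.any PySem.Chars.isdigit) = true
        · rw [if_pos h2]
          have h2' : (x.toList.any fun c => PySem.Chars.isupper c || PySem.Chars.isdigit c) = true := by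
            rw [any_or_split]; exact h2
          have hp : pvPriority jdl x = 1 := by
            unfold pvPriority; rw [if_neg h0, if_neg h1, if_pos h2']
          rw [ih]
          simp [hp]
        · rw [if_neg h2]
          have h2' : ¬ (x.toList.any fun c => PySem.Chars.isupper c || PySem.Chars.isdigit c) = true := by
            rw [any_or_split]; exact h2
          have hp : pvPriority jdl x = 2 := by
            unfold pvPriority; rw [if_neg h0, if_neg h1, if_neg h2']
          rw [ih]
          simp [hp]

-- ===== VERDICT (by name: the statement is the Claim_ definition above) =====
theorem prioritize_skills_spec : Claim_equal_prioritize_skills := by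
  intro skills jd_keywords _
  unfold Spec_prioritize_skills prioritize_skills prioritize_skills_alt
  simp only [foldA_buckets, sorted_key4 (pvPriority (jd_keywords.map PySem.Str.lower))
    (pvPriority_cases (jd_keywords.map PySem.Str.lower)) skills]
  simp
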